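-- pv_equiv track=rewrite | github.com/Denveous/gs2-parser | fix_unistd.py | fix_unistd
-- ===== SOURCE A (Python) =====
-- def fix_unistd(content):
--     lines = content.split('\n')
--     result = []
--     for i, line in enumerate(lines):
--         if '#include <unistd.h>' in line:
--             result.append('#ifdef _WIN32')
--             result.append('#include <io.h>')
--             result.append('#define isatty _isatty')
--             result.append('#define fileno _fileno')
--             result.append('#else')
--             result.append('#include <unistd.h>')
--             result.append('#endif')
--         else:
--             result.append(line)
--     return '\n'.join(result)
-- ===== SOURCE B (Python) =====
-- IFDEF_BLOCK = ('#ifdef _WIN32\n'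
--                '#include <io.h>\n'
--                '#define isatty _isatty\n'
--                '#define fileno _fileno\n'
--                '#else\n'
--                '#include <unistd.h>\n'
--                '#endif')
--
--
-- def _emit(line):
--     return IFDEF_BLOCK if '#include <unistd.h>' in line else line
--
--
-- def fix_unistd(content):
--     # single streaming pass: buffer the current line, flush it (possibly
--     # replaced by the ifdef block) at each newline and once at the end
--     out = []
--     line = []
--     for ch in content:
--         if ch == '\n':
--             out.append(_emit(''.join(line)))
--             out.append('\n')
--             line = []
--         else:
--             line.append(ch)
--     out.append(_emit(''.join(line)))
--     return ''.join(out)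
-- ===== Notes on version B (the rewrite author's own statement) =====
-- stated objective: alternative
-- what changed: Replaces A's split-into-lines / transform / newline-join pipeline by a single streaming pass over the characters with an explicit current-line buffer that is flushed (possibly replaced by the ifdef block, emitted as one pre-joined constant) at each newline and once at the end.
import Mathlib
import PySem

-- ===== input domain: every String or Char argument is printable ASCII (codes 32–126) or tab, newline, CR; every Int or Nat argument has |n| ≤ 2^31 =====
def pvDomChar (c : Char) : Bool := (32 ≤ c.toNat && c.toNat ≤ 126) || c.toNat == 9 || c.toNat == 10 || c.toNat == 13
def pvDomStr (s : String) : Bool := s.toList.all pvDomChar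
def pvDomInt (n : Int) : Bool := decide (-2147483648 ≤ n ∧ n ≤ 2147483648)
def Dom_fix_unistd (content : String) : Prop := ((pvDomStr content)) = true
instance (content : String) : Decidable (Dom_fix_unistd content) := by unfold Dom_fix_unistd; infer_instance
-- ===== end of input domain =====

-- B replaces A's split/transform/join over the line list by a single streaming pass with an
-- explicit current-line buffer (alternative decomposition, same cost); return values proved equal.

-- ===== PORT A =====
def pvNeedle : List Char := "#include <unistd.h>".toList

def fix_unistd (content : String) : String :=
  let lines := PySem.Chars.splitOn content.toList ['\n']
  let result := (PySem.List.enumerate lines).foldl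
    (fun (result : List (List Char)) il =>
      if PySem.Chars.isIn pvNeedle il.2 then
        ((((((result ++ ["#ifdef _WIN32".toList]) ++ ["#include <io.h>".toList])
            ++ ["#define isatty _isatty".toList]) ++ ["#define fileno _fileno".toList])
            ++ ["#else".toList]) ++ ["#include <unistd.h>".toList]) ++ ["#endif".toList]
      else result ++ [il.2]) []
  String.ofList (PySem.Chars.join ['\n'] result)

-- ===== PORT B =====
def pvBlock : List Char :=
  "#ifdef _WIN32\n#include <io.h>\n#define isatty _isatty\n#define fileno _fileno\n#else\n#include <unistd.h>\n#endif".toList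

def pvEmit (line : List Char) : List Char :=
  if PySem.Chars.isIn pvNeedle line then pvBlock else line

def fix_unistd_alt (content : String) : String :=
  let st := content.toList.foldl
    (fun (st : List Char × List Char) ch =>
      if ch = '\n' then (st.1 ++ pvEmit st.2 ++ ['\n'], ([] : List Char))
      else (st.1, st.2 ++ [ch])) (([] : List Char), ([] : List Char))
  String.ofList (st.1 ++ pvEmit st.2)

-- ===== PRECONDITION & SPEC =====
def Spec_fix_unistd (content : String) (out : String) : Prop := out = fix_unistd_alt content
instance (content : String) (out : String) : Decidable (Spec_fix_unistd content out) := by unfold Spec_fix_unistd; infer_instance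

-- ===== CLAIM (what is proved, stated in full; the proofs are below) =====
def Claim_equal_fix_unistd : Prop := ∀ (content : String), Dom_fix_unistd content → Spec_fix_unistd content (fix_unistd content)

-- ===== LEMMAS AND PROOFS =====

/-- The list of lines of `cs` split at `'\n'` (always nonempty), structural form. -/
def pvLines : List Char → List (List Char)
  | [] => [[]]
  | c :: rest =>
    match pvLines rest with
    | [] => [[]]            -- unreachable: pvLines is never []
    | l :: ls => if c = '\n' then [] :: l :: ls else (c :: l) :: ls

theorem pvLines_ne_nil (cs : List Char) : pvLines cs ≠ [] := by
  cases cs with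
  | nil => simp [pvLines]
  | cons c rest =>
    simp only [pvLines]
    cases h : pvLines rest with
    | nil => simp
    | cons l ls => split_ifs <;> simp

theorem pvGo_eq : ∀ (fuel : Nat) (l cur : List Char) (acc : List (List Char)),
    l.length < fuel →
    PySem.Chars.splitOn.go ['\n'] fuel l cur acc =
      acc.reverse ++ (match pvLines l with
        | [] => []
        | h :: t => (cur.reverse ++ h) :: t) := by
  intro fuel
  induction fuel with
  | zero => intro l cur acc h; omega
  | succ n ih =>
    intro l cur acc h
    cases l with
    | nil => simp [PySem.Chars.splitOn.go, pvLines]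
    | cons c rest =>
      by_cases hc : c = '\n'
      · subst hc
        rw [PySem.Chars.splitOn.go]
        rw [if_pos (by simp [List.isPrefixOf])]
        have hd : List.drop (['\n'] : List Char).length ('\n' :: rest) = rest := by simp
        rw [hd, ih rest [] (cur.reverse :: acc) (by simp at h; omega)]
        have hne := pvLines_ne_nil rest
        cases hrest : pvLines rest with
        | nil => exact absurd hrest hne
        | cons l ls => simp [pvLines, hrest]
      · rw [PySem.Chars.splitOn.go]
        rw [if_neg (by simp [List.isPrefixOf]; intro hh; exact hc hh.symm)]
        rw [ih rest (c :: cur) acc (by simp at h ⊢; omega)]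
        have hne := pvLines_ne_nil rest
        cases hrest : pvLines rest with
        | nil => exact absurd hrest hne
        | cons l ls => simp [pvLines, hrest, hc]

theorem pvSplitOn_eq (cs : List Char) :
    PySem.Chars.splitOn cs ['\n'] = pvLines cs := by
  unfold PySem.Chars.splitOn
  rw [pvGo_eq (cs.length + 1) cs [] [] (by omega)]
  have hne := pvLines_ne_nil cs
  cases h : pvLines cs with
  | nil => exact absurd h hne
  | cons l ls => simp

/-- the per-line group A appends. -/
def pvGroup (line : List Char) : List (List Char) :=
  if PySem.Chars.isIn pvNeedle line then
    ["#ifdef _WIN32".toList, "#include <io.h>".toList, "#define isatty _isatty".toList,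
     "#define fileno _fileno".toList, "#else".toList, "#include <unistd.h>".toList,
     "#endif".toList]
  else [line]

theorem pvGroup_ne_nil (line : List Char) : pvGroup line ≠ [] := by
  unfold pvGroup; split_ifs <;> simp

theorem pvA_foldl (lines : List (List Char)) :
    ∀ (start : Int) (init : List (List Char)),
    (PySem.List.enumerate lines start).foldl
      (fun (result : List (List Char)) il =>
        if PySem.Chars.isIn pvNeedle il.2 then
          ((((((result ++ ["#ifdef _WIN32".toList]) ++ ["#include <io.h>".toList])
              ++ ["#define isatty _isatty".toList]) ++ ["#define fileno _fileno".toList])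
              ++ ["#else".toList]) ++ ["#include <unistd.h>".toList]) ++ ["#endif".toList]
        else result ++ [il.2]) init
      = init ++ lines.flatMap pvGroup := by
  induction lines with
  | nil => intro start init; simp [PySem.List.enumerate]
  | cons x t ih =>
    intro start init
    rw [PySem.List.enumerate]
    simp only [List.foldl_cons]
    rw [ih (start + 1)]
    simp only [List.flatMap_cons]
    by_cases hx : PySem.Chars.isIn pvNeedle x = true <;>
      simp [pvGroup, hx, List.append_assoc]

theorem pvJoin_append (sep : List Char) (a b : List (List Char)) (ha : a ≠ []) (hb : b ≠ []) :
    PySem.Chars.join sep (a ++ b) = PySem.Chars.join sep a ++ sep ++ PySem.Chars.join sep b := by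
  induction a with
  | nil => exact absurd rfl ha
  | cons x xs ih =>
    cases xs with
    | nil =>
      cases b with
      | nil => exact absurd rfl hb
      | cons y ys => simp [PySem.Chars.join_cons_cons, PySem.Chars.join_singleton]
    | cons z zs =>
      have h1 : PySem.Chars.join sep ((x :: z :: zs) ++ b)
          = x ++ sep ++ PySem.Chars.join sep ((z :: zs) ++ b) := by
        simp only [List.cons_append]
        rw [PySem.Chars.join_cons_cons]
      rw [h1, ih (by simp), PySem.Chars.join_cons_cons]
      simp [List.append_assoc]

theorem pvJoin_group (line : List Char) :
    PySem.Chars.join ['\n'] (pvGroup line) = pvEmit line := by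
  unfold pvGroup pvEmit
  split_ifs with h
  · decide
  · exact PySem.Chars.join_singleton _ _

theorem pvJoin_flat (lines : List (List Char)) :
    PySem.Chars.join ['\n'] (lines.flatMap pvGroup)
      = PySem.Chars.join ['\n'] (lines.map pvEmit) := by
  induction lines with
  | nil => simp
  | cons x t ih =>
    cases t with
    | nil => simp [pvJoin_group]
    | cons y ys =>
      have hflat : (y :: ys).flatMap pvGroup ≠ [] := by
        simp only [List.flatMap_cons]
        intro h
        exact pvGroup_ne_nil y (List.append_eq_nil_iff.mp h).1
      rw [List.flatMap_cons]
      rw [pvJoin_append _ _ _ (pvGroup_ne_nil x) hflat, pvJoin_group, ih]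
      simp [PySem.Chars.join_cons_cons, List.append_assoc]

theorem pvB_loop (cs : List Char) :
    ∀ (out line : List Char),
    (cs.foldl
        (fun (st : List Char × List Char) ch =>
          if ch = '\n' then (st.1 ++ pvEmit st.2 ++ ['\n'], ([] : List Char))
          else (st.1, st.2 ++ [ch])) (out, line)).1
      ++ pvEmit (cs.foldl
        (fun (st : List Char × List Char) ch =>
          if ch = '\n' then (st.1 ++ pvEmit st.2 ++ ['\n'], ([] : List Char))
          else (st.1, st.2 ++ [ch])) (out, line)).2
      = out ++ PySem.Chars.join ['\n']
          (List.map pvEmit (match pvLines cs with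
            | [] => []
            | h :: t => (line ++ h) :: t)) := by
  induction cs with
  | nil => intro out line; simp [pvLines, PySem.Chars.join_singleton]
  | cons c rest ih =>
    intro out line
    by_cases hc : c = '\n'
    · subst hc
      simp only [List.foldl_cons]
      rw [ih]
      have hne := pvLines_ne_nil rest
      cases hrest : pvLines rest with
      | nil => exact absurd hrest hne
      | cons h t =>
        simp [pvLines, hrest, PySem.Chars.join_cons_cons, List.append_assoc]
    · simp only [List.foldl_cons, if_neg hc]
      rw [ih]
      have hne := pvLines_ne_nil rest
      cases hrest : pvLines rest with
      | nil => exact absurd hrest hne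
      | cons h t =>
        simp [pvLines, hrest, hc, List.append_assoc]

-- ===== VERDICT (by name: the statement is the Claim_ definition above) =====
theorem fix_unistd_spec : Claim_equal_fix_unistd := by
  intro content _
  unfold Spec_fix_unistd fix_unistd fix_unistd_alt
  dsimp only
  rw [pvA_foldl _ 0 [], pvSplitOn_eq]
  have hB := pvB_loop content.toList [] []
  rw [hB]
  have hne := pvLines_ne_nil content.toList
  cases h : pvLines content.toList with
  | nil => exact absurd h hne
  | cons l ls =>
    simp only [List.nil_append]
    rw [pvJoin_flat]
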